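-- pv_equiv track=rewrite | github.com/ssnyde/bt_scan_log | app.py | parse_adv_data
-- ===== SOURCE A (Python) =====
-- def parse_adv_data(adv_data):
--     i = 0
--     complete_local_name = None
--     short_local_name = None
--     while i < len(adv_data):
--         ad_field_length = adv_data[i]
--         ad_field_type = adv_data[i + 1]
--         ad_data = adv_data[i + 2: i + 1 + ad_field_length]
--         if ad_field_type == 0x09:
--             complete_local_name = ad_data
--         if ad_field_type == 0x08:
--             short_local_name = ad_data
--         i += ad_field_length + 1
--     return (complete_local_name, short_local_name)
-- ===== SOURCE B (Python) =====
-- def iter_ad_fields(adv_data):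
--     """Yield (ad_field_type, ad_data) for each TLV field in the stream."""
--     rest = list(adv_data)
--     while rest:
--         ad_field_length = rest[0]
--         ad_field_type = rest[1]
--         yield (ad_field_type, rest[2:ad_field_length + 1])
--         rest = rest[ad_field_length + 1:]
--
--
-- def parse_adv_data(adv_data):
--     fields = list(iter_ad_fields(adv_data))
--     complete_local_name = next((d for t, d in reversed(fields) if t == 0x09), None)
--     short_local_name = next((d for t, d in reversed(fields) if t == 0x08), None)
--     return (complete_local_name, short_local_name)
-- ===== Notes on version B (the rewrite author's own statement) =====
-- stated objective: alternative
-- what changed: A's single fused index-walk loop is split into a generator iter_ad_fields that yields (type, data) TLV fields by consuming a list suffix, followed by two separate reverse scans that pick the last 0x09 and 0x08 fields.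
-- outside the precondition, e.g. on parse_adv_data([-3, 9, 5, 9, 9]): A returns ([-3, 9, 5, 9, 9], None), B returns ([], None)
import Mathlib
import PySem

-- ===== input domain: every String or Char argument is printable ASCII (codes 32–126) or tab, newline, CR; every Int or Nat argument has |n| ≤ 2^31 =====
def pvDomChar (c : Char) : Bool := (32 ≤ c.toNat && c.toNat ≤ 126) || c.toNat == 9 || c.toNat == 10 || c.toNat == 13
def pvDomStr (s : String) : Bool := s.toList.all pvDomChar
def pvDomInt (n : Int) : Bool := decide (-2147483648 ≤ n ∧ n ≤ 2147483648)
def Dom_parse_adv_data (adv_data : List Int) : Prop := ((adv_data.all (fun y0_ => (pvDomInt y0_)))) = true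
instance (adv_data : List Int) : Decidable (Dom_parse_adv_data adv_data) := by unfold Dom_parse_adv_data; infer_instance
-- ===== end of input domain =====

-- B separates TLV-field extraction (a generator) from name selection (reverse scans);
-- objective: alternative decomposition, no speed claim.

-- ===== PORT A =====
-- A's while-loop over an index i; fuel (adv_data.length + 1) is ample because inside
-- Pre_ each step advances i by at least 1; outside Pre_ nothing is claimed.
def parse_adv_data_go (xs : List Int) : Int → Option (List Int) → Option (List Int) → Nat → Option (List Int) × Option (List Int)
  | _, c, s, 0 => (c, s)
  | i, c, s, fuel+1 =>
    if i < (xs.length : Int) then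
      match PySem.List.pyGet? xs i, PySem.List.pyGet? xs (i+1) with
      | some fl, some ft =>
        let ad := PySem.List.slice xs (some (i+2)) (some (i+1+fl))
        parse_adv_data_go xs (i + fl + 1) (if ft == 9 then some ad else c) (if ft == 8 then some ad else s) fuel
      | _, _ => (c, s)   -- IndexError in the Python; outside Pre_
    else (c, s)

def parse_adv_data (adv_data : List Int) : Option (List Int) × Option (List Int) :=
  parse_adv_data_go adv_data 0 none none (adv_data.length + 1)

-- ===== PORT B =====
-- the generator iter_ad_fields: consumes a suffix `rest`, yields (type, data) pairs
def iter_ad_fields_go : List Int → Nat → List (Int × List Int)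
  | _, 0 => []
  | [], _+1 => []
  | fl :: rest', fuel+1 =>
    match PySem.List.pyGet? (fl :: rest') 1 with
    | none => []   -- IndexError in the Python generator; outside Pre_
    | some ft =>
      (ft, PySem.List.slice (fl :: rest') (some 2) (some (fl+1))) ::
        iter_ad_fields_go (PySem.List.slice (fl :: rest') (some (fl+1)) none) fuel

def parse_adv_data_alt (adv_data : List Int) : Option (List Int) × Option (List Int) :=
  let fields := iter_ad_fields_go adv_data (adv_data.length + 1)
  ((fields.reverse.find? (fun p => p.1 == 9)).map Prod.snd,
   (fields.reverse.find? (fun p => p.1 == 8)).map Prod.snd)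

-- ===== PRECONDITION & SPEC =====
-- Pre_ admits exactly the well-formed TLV streams: walking the stream, every field
-- has a nonnegative length byte and a type byte present. It excludes (a) truncated
-- streams, on which A raises IndexError, (b) streams with a length byte -1 reached by
-- the walk, on which A loops forever, and (c) streams with other negative length
-- bytes, on which A's value (if it returns at all) arises from Python's
-- negative-index wraparound — a defensible-corner artefact (see cites).
-- wfTLVGo is a shape predicate on the list (each field starts with a nonnegative
-- length byte followed by a type byte); its Nat argument is only a structural
-- recursion bound (xs.length always suffices), not part of the condition.
def wfTLVGo : List Int → Nat → Bool
  | [], _ => true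
  | _ :: _, 0 => false   -- unreachable while fuel ≥ length
  | fl :: rest, fuel+1 => decide (0 ≤ fl) && !rest.isEmpty && wfTLVGo (rest.drop fl.toNat) fuel

def wfTLV (xs : List Int) : Bool := wfTLVGo xs xs.length

def Pre_parse_adv_data (adv_data : List Int) : Prop := wfTLV adv_data = true
instance (adv_data : List Int) : Decidable (Pre_parse_adv_data adv_data) := by
  unfold Pre_parse_adv_data; infer_instance

def pvWitness_parse_adv_data : List Int := [4, 9, 72, 105, 33]

def Spec_parse_adv_data (adv_data : List Int) (out : Option (List Int) × Option (List Int)) : Prop := out = parse_adv_data_alt adv_data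
instance (adv_data : List Int) (out : Option (List Int) × Option (List Int)) : Decidable (Spec_parse_adv_data adv_data out) := by unfold Spec_parse_adv_data; infer_instance

-- ===== CLAIM (what is proved, stated in full; the proofs are below) =====
def Claim_equal_parse_adv_data : Prop := ∀ (adv_data : List Int), Dom_parse_adv_data adv_data → Pre_parse_adv_data adv_data → Spec_parse_adv_data adv_data (parse_adv_data adv_data)

-- ===== LEMMAS AND PROOFS =====

theorem wfTLVGo_congr : ∀ (fuel fuel' : Nat) (xs : List Int), xs.length ≤ fuel → xs.length ≤ fuel' →
    wfTLVGo xs fuel = wfTLVGo xs fuel' := by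
  intro fuel
  induction fuel with
  | zero =>
    intro fuel' xs h _
    have : xs = [] := List.eq_nil_of_length_eq_zero (by omega)
    subst this
    cases fuel' <;> rfl
  | succ fuel ih =>
    intro fuel' xs h h'
    cases xs with
    | nil => cases fuel' <;> rfl
    | cons fl rest =>
      cases fuel' with
      | zero => simp at h'
      | succ fuel' =>
        simp only [wfTLVGo]
        congr 1
        exact ih fuel' (rest.drop fl.toNat) (by simp at h ⊢; omega) (by simp at h' ⊢; omega)

theorem wfTLV_cons_iff (fl : Int) (rest : List Int) :
    wfTLV (fl :: rest) = true ↔ (0 ≤ fl ∧ rest ≠ [] ∧ wfTLV (rest.drop fl.toNat) = true) := by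
  unfold wfTLV
  rw [show (fl :: rest).length = rest.length + 1 from rfl]
  simp only [wfTLVGo, Bool.and_eq_true, decide_eq_true_eq, Bool.not_eq_true', List.isEmpty_eq_false_iff]
  rw [wfTLVGo_congr rest.length (rest.drop fl.toNat).length (rest.drop fl.toNat) (by simp) le_rfl]
  tauto

-- last-write-wins accumulator semantics of A's fused loop, over a field list
def pvApply (fields : List (Int × List Int)) (p : Option (List Int) × Option (List Int)) : Option (List Int) × Option (List Int) :=
  fields.foldl (fun q f => (if f.1 == 9 then some f.2 else q.1, if f.1 == 8 then some f.2 else q.2)) p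

theorem pvApply_nil (p) : pvApply [] p = p := rfl

theorem pvApply_cons (f fs p) : pvApply (f :: fs) p =
    pvApply fs (if f.1 == 9 then some f.2 else p.1, if f.1 == 8 then some f.2 else p.2) := rfl

-- selection by reverse find? computes the same as the fused accumulator
theorem pvApply_eq_find (fields : List (Int × List Int)) (c s : Option (List Int)) :
    pvApply fields (c, s) =
      ((fields.reverse.find? (fun p => p.1 == 9)).elim c (fun f => some f.2),
       (fields.reverse.find? (fun p => p.1 == 8)).elim s (fun f => some f.2)) := by
  induction fields generalizing c s with
  | nil => simp [pvApply_nil]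
  | cons f fs ih =>
    rw [pvApply_cons, ih]
    simp only [List.reverse_cons, List.find?_append, List.find?_singleton]
    cases h9 : fs.reverse.find? (fun p => p.1 == 9) <;>
      cases h8 : fs.reverse.find? (fun p => p.1 == 8) <;>
        cases hf9 : (f.1 == 9) <;> cases hf8 : (f.1 == 8) <;>
          simp_all

-- main bridge: A's index walk over xs, started at position n, equals the accumulator
-- applied to the fields the generator yields from the suffix xs.drop n
theorem go_eq_apply (xs : List Int) :
    ∀ (fuel n : Nat) (c s : Option (List Int)),
      wfTLV (xs.drop n) = true → (xs.drop n).length < fuel →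
      parse_adv_data_go xs (n : Int) c s fuel =
        pvApply (iter_ad_fields_go (xs.drop n) fuel) (c, s) := by
  intro fuel
  induction fuel with
  | zero => intro n c s _ h; omega
  | succ fuel ih =>
    intro n c s hwf hlen
    cases hrest : xs.drop n with
    | nil =>
      have hge : xs.length ≤ n := by
        by_contra h
        have := List.drop_eq_nil_iff.mp hrest
        omega
      simp [parse_adv_data_go, iter_ad_fields_go, pvApply_nil]
      omega
    | cons fl rest' =>
      have hlt : n < xs.length := by
        by_contra h
        rw [List.drop_eq_nil_iff.mpr (by omega)] at hrest
        simp at hrest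
      rw [hrest, wfTLV_cons_iff] at hwf
      obtain ⟨hfl0, hne, hwf'⟩ := hwf
      obtain ⟨l, rfl⟩ : ∃ l : Nat, fl = (l : Int) := ⟨fl.toNat, (Int.toNat_of_nonneg hfl0).symm⟩
      cases rest' with
      | nil => exact absurd rfl hne
      | cons ft rest'' =>
        -- evaluate one step of A's loop
        have hget0 : PySem.List.pyGet? xs (n : Int) = some ((l : Int)) := by
          rw [PySem.List.pyGet?_natCast]
          have h0 : (List.drop n xs)[0]? = xs[n]? := by simp [List.getElem?_drop]
          rw [← h0, hrest]; rfl
        have hget1 : PySem.List.pyGet? xs ((n : Int) + 1) = some ft := by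
          have e : ((n : Int) + 1) = ((n + 1 : Nat) : Int) := by push_cast; ring
          rw [e, PySem.List.pyGet?_natCast]
          have h1 : (List.drop n xs)[1]? = xs[n+1]? := by simp [List.getElem?_drop]
          rw [← h1, hrest]; rfl
        have hslice : PySem.List.slice xs (some ((n : Int) + 2)) (some ((n : Int) + 1 + (l : Int))) =
            PySem.List.slice ((l : Int) :: ft :: rest'') (some 2) (some ((l : Int) + 1)) := by
          have e1 : ((n : Int) + 2) = ((n + 2 : Nat) : Int) := by push_cast; ring
          have e2 : ((n : Int) + 1 + (l : Int)) = ((n + 1 + l : Nat) : Int) := by push_cast; ring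
          have e3 : ((l : Int) + 1) = ((l + 1 : Nat) : Int) := by push_cast; ring
          rw [e1, e2, e3]
          have e4 : ((2 : Int)) = ((2 : Nat) : Int) := rfl
          rw [e4, PySem.List.slice_natCast, PySem.List.slice_natCast]
          rw [← hrest, ← List.drop_drop]
          congr 1
          omega
        have hdropnew : xs.drop (n + (l + 1)) = (ft :: rest'').drop l := by
          rw [← List.drop_drop, hrest, List.drop_succ_cons]
        have hslicefrom : PySem.List.slice ((l : Int) :: ft :: rest'') (some ((l : Int) + 1)) none =
            (ft :: rest'').drop l := by
          have e3 : ((l : Int) + 1) = ((l + 1 : Nat) : Int) := by push_cast; ring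
          rw [e3, PySem.List.slice_from_natCast, List.drop_succ_cons]
        rw [parse_adv_data_go]
        rw [if_pos (by exact_mod_cast hlt), hget0, hget1]
        dsimp only
        rw [iter_ad_fields_go]
        have hget1' : PySem.List.pyGet? ((l : Int) :: ft :: rest'') 1 = some ft := by
          simp [PySem.List.pyGet?, PySem.List.pyIdx?]
        rw [hget1']
        dsimp only
        rw [pvApply_cons]
        simp only [hslice, hslicefrom]
        have estep : ((n : Int) + (l : Int) + 1) = ((n + (l + 1) : Nat) : Int) := by push_cast; ring
        rw [estep]
        have hlen2 : (xs.drop (n + (l + 1))).length < fuel := by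
          rw [hrest] at hlen
          simp only [List.length_cons] at hlen
          rw [hdropnew]
          have hL : (List.drop l (ft :: rest'')).length = rest''.length + 1 - l := by simp
          omega
        rw [ih (n + (l + 1)) _ _ (by rw [hdropnew]; simpa using hwf') hlen2]
        rw [hdropnew]

-- ===== VERDICT (by name: the statement is the Claim_ definition above) =====
theorem parse_adv_data_spec : Claim_equal_parse_adv_data := by
  intro adv hdom hpre
  unfold Spec_parse_adv_data parse_adv_data parse_adv_data_alt
  have h := go_eq_apply adv (adv.length + 1) 0 none none (by simpa using hpre) (by simp)
  simp only [Nat.cast_zero, List.drop_zero] at h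
  rw [h, pvApply_eq_find]
  have hm : ∀ (o : Option (Int × List Int)),
      o.elim (none : Option (List Int)) (fun f => some f.2) = o.map Prod.snd := by
    intro o; cases o <;> rfl
  rw [hm, hm]
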